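-- pv_equiv track=rewrite | github.com/nkoturovic/occams-code | scripts/repo-ingest.py | _parse_go_deps
-- ===== SOURCE A (Python) =====
-- def _parse_go_deps(content: str) -> list[str]:
--     """Extract module hints from go.mod."""
--     hints: list[str] = []
--     _GO_HINTS = {
--         "gin-gonic": "Gin",
--         "echo": "Echo",
--         "fiber": "Fiber",
--         "chi": "Chi",
--         "gorm": "GORM",
--         "sqlx": "sqlx (Go)",
--         "grpc": "gRPC",
--     }
--     for line in content.splitlines():
--         line_lower = line.lower()
--         for key, label in _GO_HINTS.items():
--             if key in line_lower and label not in hints: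
--                 hints.append(label)
--     return hints
-- ===== SOURCE B (Python) =====
-- def _first_line_with(lines, key):
--     for i, line in enumerate(lines):
--         if key in line:
--             return i
--     return None
--
--
-- def _parse_go_deps(content: str) -> list[str]:
--     """Extract module hints from go.mod."""
--     _GO_HINTS = {
--         "gin-gonic": "Gin",
--         "echo": "Echo",
--         "fiber": "Fiber",
--         "chi": "Chi",
--         "gorm": "GORM",
--         "sqlx": "sqlx (Go)",
--         "grpc": "gRPC",
--     }
--     lines = [line.lower() for line in content.splitlines()]
--     n = len(_GO_HINTS)
--     ranked = []
--     for pos, (key, label) in enumerate(_GO_HINTS.items()):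
--         row = _first_line_with(lines, key)
--         if row is not None:
--             # rank encodes the pair (row, pos) lexicographically, since pos < n
--             ranked.append((row * n + pos, label))
--     ranked.sort(key=lambda t: t[0])
--     return [label for _, label in ranked]
-- ===== Notes on version B (the rewrite author's own statement) =====
-- stated objective: alternative
-- what changed: Inverts the traversal: instead of A's per-line scan appending labels guarded by a membership dedup, B searches per hint for the first line containing its key, tags each hit with a numeric rank encoding (first-line, dict-position) lexicographically, sorts the hits by rank, and reads off the labels.
import Mathlib
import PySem

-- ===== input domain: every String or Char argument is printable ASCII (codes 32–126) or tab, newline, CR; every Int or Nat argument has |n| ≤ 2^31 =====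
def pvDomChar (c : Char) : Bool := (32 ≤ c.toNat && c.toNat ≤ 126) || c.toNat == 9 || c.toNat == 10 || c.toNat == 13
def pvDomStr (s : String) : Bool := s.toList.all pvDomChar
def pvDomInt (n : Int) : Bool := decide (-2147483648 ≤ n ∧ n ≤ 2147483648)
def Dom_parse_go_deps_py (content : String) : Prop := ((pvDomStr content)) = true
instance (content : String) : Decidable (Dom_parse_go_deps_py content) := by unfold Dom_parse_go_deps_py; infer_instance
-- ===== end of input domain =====

-- B inverts the traversal: per hint it finds the first line containing the key, ranks each hit by
-- (first line, dict position) encoded as row*n+pos, sorts by rank and reads off labels (alternative algorithm).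


-- ===== PORT A =====
-- the _GO_HINTS dict literal (insertion order), shared by both ports
def goHints : List (String × String) :=
  [("gin-gonic", "Gin"), ("echo", "Echo"), ("fiber", "Fiber"), ("chi", "Chi"),
   ("gorm", "GORM"), ("sqlx", "sqlx (Go)"), ("grpc", "gRPC")]

def parse_go_deps_py (content : String) : List String :=
  (PySem.Str.splitlines content).foldl (fun hints line =>
    goHints.foldl (fun hints kl =>
      if PySem.Str.isIn kl.1 (PySem.Str.lower line) && !hints.contains kl.2 then hints ++ [kl.2]
      else hints) hints) []

-- ===== PORT B =====
-- Python's enumerate(xs) starting at i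
def pyEnum {α : Type} (i : Nat) : List α → List (Nat × α)
  | [] => []
  | x :: xs => (i, x) :: pyEnum (i + 1) xs

-- _first_line_with(lines, key): index of the first line containing key (i is the running counter)
def fidx (key : String) : List String → Nat → Option Nat
  | [], _ => none
  | l :: ls, i => if PySem.Str.isIn key l then some i else fidx key ls (i + 1)

def parse_go_deps_py_alt (content : String) : List String :=
  (PySem.List.sorted
    ((pyEnum 0 goHints).foldl (fun acc h =>
      match fidx h.2.1 ((PySem.Str.splitlines content).map PySem.Str.lower) 0 with
      | some row => acc ++ [(row * goHints.length + h.1, h.2.2)]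
      | none => acc) ([] : List (Nat × String)))
    (fun t => t.1)).map (fun t => t.2)

-- ===== PRECONDITION & SPEC =====
def Spec_parse_go_deps_py (content : String) (out : List String) : Prop := out = parse_go_deps_py_alt content
instance (content : String) (out : List String) : Decidable (Spec_parse_go_deps_py content out) := by unfold Spec_parse_go_deps_py; infer_instance

-- ===== CLAIM (what is proved, stated in full; the proofs are below) =====
def Claim_equal_parse_go_deps_py : Prop := ∀ (content : String), Dom_parse_go_deps_py content → Spec_parse_go_deps_py content (parse_go_deps_py content)

-- ===== LEMMAS AND PROOFS =====

-- canonical per-line emission of ranked (row*n+pos, label) pairs from the pool r of not-yet-matched hints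
def emit (n : Nat) : Nat → List String → List (Nat × String × String) → List (Nat × String)
  | _, [], _ => []
  | i, l :: ls, r =>
      ((r.filter (fun h => PySem.Str.isIn h.2.1 l)).map (fun h => (i * n + h.1, h.2.2)))
        ++ emit n (i + 1) ls (r.filter (fun h => !PySem.Str.isIn h.2.1 l))

theorem foldl_optAppend {γ β : Type} (f : γ → Option Nat) (g : γ → Nat → β) :
    ∀ (l : List γ) (acc : List β),
    l.foldl (fun acc x => match f x with | some row => acc ++ [g x row] | none => acc) acc
      = acc ++ l.filterMap (fun x => (f x).map (g x)) := by
  intro l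
  induction l with
  | nil => intro acc; simp
  | cons x xs ih =>
    intro acc
    cases hx : f x <;> simp [List.foldl_cons, hx, ih]

theorem innerA (ll : String) :
    ∀ (items : List (String × String)) (acc : List String),
    (items.map (fun kl => kl.2)).Nodup →
    items.foldl (fun hints kl =>
        if PySem.Str.isIn kl.1 ll && !hints.contains kl.2 then hints ++ [kl.2] else hints) acc
      = acc ++ (items.filter (fun kl => PySem.Str.isIn kl.1 ll && !acc.contains kl.2)).map (fun kl => kl.2) := by
  intro items
  induction items with
  | nil => intro acc _; simp
  | cons kl rest ih =>
    intro acc hnd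
    simp only [List.map_cons, List.nodup_cons] at hnd
    obtain ⟨hlab, hnd⟩ := hnd
    simp only [List.foldl_cons, List.filter_cons]
    by_cases hc : (PySem.Str.isIn kl.1 ll && !acc.contains kl.2) = true
    · rw [if_pos hc, if_pos hc, ih _ hnd]
      have hcongr : rest.filter (fun kl' => PySem.Str.isIn kl'.1 ll && !(acc ++ [kl.2]).contains kl'.2)
          = rest.filter (fun kl' => PySem.Str.isIn kl'.1 ll && !acc.contains kl'.2) := by
        apply List.filter_congr
        intro kl' hmem
        have hne : kl'.2 ≠ kl.2 := by
          intro heq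
          exact hlab (List.mem_map.mpr ⟨kl', hmem, heq⟩)
        have : (acc ++ [kl.2]).contains kl'.2 = acc.contains kl'.2 := by
          simp [hne]
        rw [this]
      rw [hcongr]
      simp
    · rw [if_neg hc, if_neg hc, ih _ hnd]

theorem pyEnum_filter_map {β : Type} (f : String × String → Bool) (g : String × String → β) :
    ∀ (items : List (String × String)) (i : Nat),
    ((pyEnum i items).filter (fun h => f h.2)).map (fun h => g h.2) = (items.filter f).map g := by
  intro items
  induction items with
  | nil => intro i; rfl
  | cons kl rest ih =>
    intro i
    simp only [pyEnum, List.filter_cons]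
    by_cases hc : f kl = true
    · simp [hc, ih]
    · simp only [Bool.not_eq_true] at hc
      simp [hc, ih]

theorem mem_pyEnum_snd {α : Type} :
    ∀ (items : List α) (i : Nat) (h : Nat × α), h ∈ pyEnum i items → h.2 ∈ items := by
  intro items
  induction items with
  | nil => intro i h hm; cases hm
  | cons x xs ih =>
    intro i h hm
    cases hm with
    | head => exact List.mem_cons_self
    | tail _ hm => exact List.mem_cons_of_mem _ (ih _ _ hm)

-- with distinct labels, membership of kl.2 in the labels of a filtered list decides the predicate at kl
theorem contains_filter_labels (items : List (String × String))
    (hnd : (items.map (fun kl => kl.2)).Nodup) (p : String × String → Bool)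
    (kl : String × String) (hmem : kl ∈ items) :
    ((items.filter p).map (fun kl' => kl'.2)).contains kl.2 = p kl := by
  by_cases hp : p kl = true
  · rw [hp]
    have : kl.2 ∈ (items.filter p).map (fun kl' => kl'.2) :=
      List.mem_map.mpr ⟨kl, List.mem_filter.mpr ⟨hmem, hp⟩, rfl⟩
    simpa using this
  · simp only [Bool.not_eq_true] at hp
    rw [hp]
    simp only [Bool.eq_false_iff, ne_eq, List.contains_iff_mem]
    intro hin
    obtain ⟨kl', hmem', heq⟩ := List.mem_map.mp hin
    have hmem'' := (List.mem_filter.mp hmem').1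
    have : kl' = kl := List.inj_on_of_nodup_map hnd hmem'' hmem heq
    rw [this] at hmem'
    have := (List.mem_filter.mp hmem').2
    rw [hp] at this
    cases this

theorem A_main :
    ∀ (L : List String) (acc : List String) (i : Nat),
    L.foldl (fun hints ll => goHints.foldl (fun hints kl =>
        if PySem.Str.isIn kl.1 ll && !hints.contains kl.2 then hints ++ [kl.2] else hints) hints) acc
      = acc ++ (emit goHints.length i L
          ((pyEnum 0 goHints).filter (fun h => !acc.contains h.2.2))).map (fun t => t.2) := by
  have hnd : (goHints.map (fun kl => kl.2)).Nodup := by decide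
  intro L
  induction L with
  | nil => intro acc i; simp [emit]
  | cons l L ih =>
    intro acc i
    simp only [List.foldl_cons]
    rw [innerA l goHints acc hnd, ih _ (i + 1)]
    simp only [emit, List.map_append, ← List.append_assoc]
    congr 1
    · -- acc ++ matched labels = acc ++ (r.filter match).map (·.2.2)
      congr 1
      rw [← pyEnum_filter_map (fun kl => PySem.Str.isIn kl.1 l && !acc.contains kl.2) (fun kl => kl.2) goHints 0,
        List.map_map, List.filter_filter]
      rfl
    · -- pools agree
      apply congrArg
      apply congrArg
      rw [List.filter_filter]
      apply List.filter_congr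
      intro h hmem
      have hsnd : h.2 ∈ goHints := mem_pyEnum_snd goHints 0 h hmem
      rw [List.contains_append,
        contains_filter_labels goHints hnd (fun kl => PySem.Str.isIn kl.1 l && !acc.contains kl.2) h.2 hsnd]
      cases hA : acc.contains h.2.2 <;> cases hm : PySem.Str.isIn h.2.1 l <;> simp

theorem filterMap_some_eq_map {α β : Type} (g : α → β) (s : List α) :
    s.filterMap (fun x => some (g x)) = s.map g := by
  simp

theorem emit_perm (n : Nat) :
    ∀ (L : List String) (i : Nat) (r : List (Nat × String × String)),
    (emit n i L r).Perm
      (r.filterMap (fun h => (fidx h.2.1 L i).map (fun row => (row * n + h.1, h.2.2)))) := by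
  intro L
  induction L with
  | nil =>
    intro i r
    have : r.filterMap (fun h => (fidx h.2.1 [] i).map (fun row => (row * n + h.1, h.2.2))) = [] := by
      rw [List.filterMap_eq_nil_iff]
      intro h _
      rfl
    rw [this]
    exact List.Perm.refl _
  | cons l L ih =>
    intro i r
    have hsplit : (r.filter (fun h => PySem.Str.isIn h.2.1 l) ++ r.filter (fun h => !PySem.Str.isIn h.2.1 l)).Perm r :=
      List.filter_append_perm _ r
    have h1 : (r.filter (fun h => PySem.Str.isIn h.2.1 l)).filterMap
        (fun h => (fidx h.2.1 (l :: L) i).map (fun row => (row * n + h.1, h.2.2)))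
        = (r.filter (fun h => PySem.Str.isIn h.2.1 l)).map (fun h => (i * n + h.1, h.2.2)) := by
      rw [List.filterMap_congr (g := fun h => some (i * n + h.1, h.2.2)) ?_, filterMap_some_eq_map]
      intro h hmem
      have hin := (List.mem_filter.mp hmem).2
      simp only [PySem.Str.isIn] at hin
      simp [fidx, hin]
    have h2 : (r.filter (fun h => !PySem.Str.isIn h.2.1 l)).filterMap
        (fun h => (fidx h.2.1 (l :: L) i).map (fun row => (row * n + h.1, h.2.2)))
        = (r.filter (fun h => !PySem.Str.isIn h.2.1 l)).filterMap
            (fun h => (fidx h.2.1 L (i + 1)).map (fun row => (row * n + h.1, h.2.2))) := by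
      apply List.filterMap_congr
      intro h hmem
      have hin := (List.mem_filter.mp hmem).2
      simp only [Bool.not_eq_eq_eq_not, Bool.not_true, PySem.Str.isIn] at hin
      simp [fidx, hin]
    have step1 : (emit n i (l :: L) r).Perm
        ((r.filter (fun h => PySem.Str.isIn h.2.1 l)).map (fun h => (i * n + h.1, h.2.2))
          ++ (r.filter (fun h => !PySem.Str.isIn h.2.1 l)).filterMap
              (fun h => (fidx h.2.1 L (i + 1)).map (fun row => (row * n + h.1, h.2.2)))) :=
      List.Perm.append_left _ (ih (i + 1) _)
    have step2 : ((r.filter (fun h => PySem.Str.isIn h.2.1 l)).map (fun h => (i * n + h.1, h.2.2))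
          ++ (r.filter (fun h => !PySem.Str.isIn h.2.1 l)).filterMap
              (fun h => (fidx h.2.1 L (i + 1)).map (fun row => (row * n + h.1, h.2.2))))
        = (r.filter (fun h => PySem.Str.isIn h.2.1 l) ++ r.filter (fun h => !PySem.Str.isIn h.2.1 l)).filterMap
            (fun h => (fidx h.2.1 (l :: L) i).map (fun row => (row * n + h.1, h.2.2))) := by
      rw [List.filterMap_append, h1, h2]
    exact (step2 ▸ step1).trans (hsplit.filterMap _)

theorem emit_rank_lb (n : Nat) :
    ∀ (L : List String) (i : Nat) (r : List (Nat × String × String)),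
    ∀ x ∈ emit n i L r, i * n ≤ x.1 := by
  intro L
  induction L with
  | nil => intro i r x hx; cases hx
  | cons l L ih =>
    intro i r x hx
    rw [emit, List.mem_append] at hx
    cases hx with
    | inl hx =>
      obtain ⟨h, _, heq⟩ := List.mem_map.mp hx
      rw [← heq]
      exact Nat.le_add_right _ _
    | inr hx =>
      have := ih (i + 1) _ x hx
      calc i * n ≤ (i + 1) * n := Nat.mul_le_mul_right n (Nat.le_succ i)
        _ ≤ x.1 := this

theorem emit_pairwise (n : Nat) :
    ∀ (L : List String) (i : Nat) (r : List (Nat × String × String)),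
    r.Pairwise (fun a b => a.1 < b.1) → (∀ h ∈ r, h.1 < n) →
    (emit n i L r).Pairwise (fun a b => a.1 < b.1) := by
  intro L
  induction L with
  | nil => intro i r _ _; exact List.Pairwise.nil
  | cons l L ih =>
    intro i r hpw hbd
    rw [emit]
    apply List.pairwise_append.mpr
    refine ⟨?_, ?_, ?_⟩
    · apply List.Pairwise.map
      · intro a b hab
        exact Nat.add_lt_add_left hab (i * n)
      · exact hpw.filter _
    · apply ih (i + 1)
      · exact hpw.filter _
      · intro h hm
        exact hbd h (List.mem_filter.mp hm).1
    · intro x hx y hy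
      obtain ⟨h, hhm, heq⟩ := List.mem_map.mp hx
      have hb : h.1 < n := hbd h (List.mem_filter.mp hhm).1
      have hylb : (i + 1) * n ≤ y.1 := emit_rank_lb n L (i + 1) _ y hy
      rw [← heq]
      calc i * n + h.1 < i * n + n := Nat.add_lt_add_left hb _
        _ = (i + 1) * n := by ring
        _ ≤ y.1 := hylb

-- ===== VERDICT (by name: the statement is the Claim_ definition above) =====
theorem parse_go_deps_py_spec : Claim_equal_parse_go_deps_py := by
  intro content _
  unfold Spec_parse_go_deps_py parse_go_deps_py parse_go_deps_py_alt
  rw [foldl_optAppend (fun h => fidx h.2.1 ((PySem.Str.splitlines content).map PySem.Str.lower) 0)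
    (fun h row => (row * goHints.length + h.1, h.2.2)) (pyEnum 0 goHints) []]
  rw [← List.foldl_map (f := PySem.Str.lower)
    (g := fun hints ll => goHints.foldl (fun hints kl =>
      if PySem.Str.isIn kl.1 ll && !hints.contains kl.2 then hints ++ [kl.2] else hints) hints)]
  rw [A_main ((PySem.Str.splitlines content).map PySem.Str.lower) [] 0]
  have hE : (pyEnum 0 goHints).filter (fun h => !(List.contains ([] : List String) h.2.2)) = pyEnum 0 goHints := by
    decide
  rw [hE]
  have hsorted : PySem.List.sorted
      ((pyEnum 0 goHints).filterMap (fun h =>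
        (fidx h.2.1 ((PySem.Str.splitlines content).map PySem.Str.lower) 0).map
          (fun row => (row * goHints.length + h.1, h.2.2))))
      (fun t => t.1)
      = emit goHints.length 0 ((PySem.Str.splitlines content).map PySem.Str.lower) (pyEnum 0 goHints) := by
    apply PySem.List.sorted_eq_of_perm_of_pairwise_lt
    · exact emit_perm goHints.length _ 0 (pyEnum 0 goHints)
    · apply emit_pairwise
      · decide
      · decide
  simp only [List.nil_append]
  rw [hsorted]
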